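-- pv_equiv track=rewrite | github.com/molphys/Hackerrank-solutions | Artificial Intelligence/Bot Building/Click-o-Mania.py | collapse_grid
-- ===== SOURCE A (Python) =====
-- def collapse_grid(x,y,z,grid,p1=0,p3=0):
--     #drop points down
--     new_grid=[['-' for j in range(y)] for i in range(x)]
--     col=0
--     for j in range(y):
--         row=x-1
--         cnt=0
--         for i in range(x-1,-1,-1):
--             if grid[i][j]=='-':
--                 continue
--             new_grid[row][col]=grid[i][j]
--             row-=1
--             cnt+=1
--         if cnt==0: continue
--         col+=1
--     return new_grid
-- ===== SOURCE B (Python) =====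
-- def collapse_grid(x, y, z, grid, p1=0, p3=0):
--     # Bottom-up row sweep with one cursor per surviving column: no preallocated
--     # grid, no intermediate compacted columns, no transpose.
--     keep = [j for j in range(y) if any(grid[i][j] != '-' for i in range(x))]
--     ptr = [x - 1] * len(keep)
--     out = []
--     for _ in range(x):
--         row = []
--         for c, j in enumerate(keep):
--             i = ptr[c]
--             while i >= 0 and grid[i][j] == '-':
--                 i -= 1
--             row.append(grid[i][j] if i >= 0 else '-')
--             ptr[c] = i - 1
--         row += ['-'] * (y - len(keep))
--         out.append(row)
--     out.reverse()
--     return out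
-- ===== Notes on version B (the rewrite author's own statement) =====
-- stated objective: alternative
-- what changed: Replaces A's preallocated x-by-y grid mutated column-by-column (running row/col write counters) with a bottom-up row sweep: one upward-scanning cursor per surviving column yields that column's next non-dash cell, rows are emitted bottom-to-top and reversed at the end - no target-grid preallocation, no compacted column lists, no transpose.
import Mathlib
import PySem

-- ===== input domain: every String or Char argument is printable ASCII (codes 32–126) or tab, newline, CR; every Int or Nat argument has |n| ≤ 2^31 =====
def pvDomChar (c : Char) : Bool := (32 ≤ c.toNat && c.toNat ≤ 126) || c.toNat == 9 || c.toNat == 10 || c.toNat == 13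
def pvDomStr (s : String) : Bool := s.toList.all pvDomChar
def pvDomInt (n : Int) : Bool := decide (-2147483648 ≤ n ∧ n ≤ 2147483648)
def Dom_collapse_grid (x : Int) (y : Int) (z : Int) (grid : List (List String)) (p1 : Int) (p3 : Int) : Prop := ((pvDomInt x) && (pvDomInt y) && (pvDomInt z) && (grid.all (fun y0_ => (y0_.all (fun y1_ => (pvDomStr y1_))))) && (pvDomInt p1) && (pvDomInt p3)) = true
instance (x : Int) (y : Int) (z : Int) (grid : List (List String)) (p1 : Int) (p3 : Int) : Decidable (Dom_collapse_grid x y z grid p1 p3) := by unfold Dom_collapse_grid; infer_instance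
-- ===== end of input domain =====

-- B replaces A's preallocated grid written column-by-column with a bottom-up row sweep:
-- one upward-scanning cursor per surviving column yields that column's next non-dash
-- cell, rows are emitted bottom-to-top and reversed at the end; objective: alternative
-- (no target-grid preallocation, no compacted column lists, no transpose).

-- ===== PORT A =====
-- grid[i][j] reads and new_grid[row][col] writes use the total pyGetD/pySetD forms; on
-- Pre_ every such index is in range, so the port is exact there.
def collapse_grid (x : Int) (y : Int) (z : Int) (grid : List (List String)) (p1 : Int) (p3 : Int) : List (List String) :=
  let new_grid : List (List String) :=
    (PySem.List.pyRange 0 x 1).map (fun _ => (PySem.List.pyRange 0 y 1).map (fun _ => "-"))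
  let st :=
    (PySem.List.pyRange 0 y 1).foldl (fun (st : List (List String) × Int) j =>
      let inner :=
        (PySem.List.pyRange (x - 1) (-1) (-1)).foldl
          (fun (s : List (List String) × Int × Int) i =>
            let v := PySem.List.pyGetD (PySem.List.pyGetD grid i []) j "-"
            if v = "-" then s
            else (PySem.List.pySetD s.1 s.2.1
                    (PySem.List.pySetD (PySem.List.pyGetD s.1 s.2.1 []) st.2 v),
                  s.2.1 - 1, s.2.2 + 1))
          (st.1, (x - 1, 0))
      if inner.2.2 = 0 then (inner.1, st.2) else (inner.1, st.2 + 1))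
      (new_grid, 0)
  st.1

-- ===== PORT B =====
-- B's inner 'while i >= 0 and grid[i][j] == "-": i -= 1' as a recursive helper; grid
-- reads use the total pyGetD form (exact on Pre_).
def pvScanB (grid : List (List String)) (j : Int) (i : Int) : Int :=
  if h : 0 ≤ i ∧ PySem.List.pyGetD (PySem.List.pyGetD grid i []) j "-" = "-" then
    pvScanB grid j (i - 1)
  else i
termination_by (i + 1).toNat
decreasing_by
  rcases h with ⟨h1, -⟩
  omega

-- 'for c, j in enumerate(keep)' with ptr[c] reads/writes is ported as the fold over
-- keep.zip ptr rebuilding (row, ptr), since len(ptr) == len(keep) throughout;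
-- ['-']*(y-len(keep)) and [x-1]*len(keep) are the replicates they denote.
def collapse_grid_alt (x : Int) (y : Int) (z : Int) (grid : List (List String)) (p1 : Int) (p3 : Int) : List (List String) :=
  let keep : List Int :=
    (PySem.List.pyRange 0 y 1).filter (fun j =>
      (PySem.List.pyRange 0 x 1).any (fun i =>
        !(PySem.List.pyGetD (PySem.List.pyGetD grid i []) j "-" == "-")))
  let st :=
    (PySem.List.pyRange 0 x 1).foldl
      (fun (st : List (List String) × List Int) _ =>
        let rp :=
          (keep.zip st.2).foldl
            (fun (rp : List String × List Int) (jp : Int × Int) =>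
              let i := pvScanB grid jp.1 jp.2
              (rp.1 ++ [if 0 ≤ i then PySem.List.pyGetD (PySem.List.pyGetD grid i []) jp.1 "-" else "-"],
               rp.2 ++ [i - 1]))
            ([], [])
        (st.1 ++ [rp.1 ++ List.replicate (y - (keep.length : Int)).toNat "-"], rp.2))
      ([], List.replicate keep.length (x - 1))
  st.1.reverse

-- ===== PRECONDITION & SPEC =====
-- Pre_ excludes exactly the inputs where Python A raises an IndexError: when both loop
-- ranges are nonempty (x > 0 and y > 0), the grid must have at least x rows and each of
-- its first x rows at least y cells; A returns normally everywhere else.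
def Pre_collapse_grid (x : Int) (y : Int) (z : Int) (grid : List (List String)) (p1 : Int) (p3 : Int) : Prop :=
  x ≤ 0 ∨ y ≤ 0 ∨ (x ≤ (grid.length : Int) ∧ ∀ r ∈ grid.take x.toNat, y ≤ (r.length : Int))
instance (x : Int) (y : Int) (z : Int) (grid : List (List String)) (p1 : Int) (p3 : Int) : Decidable (Pre_collapse_grid x y z grid p1 p3) := by unfold Pre_collapse_grid; infer_instance

def pvWitness_collapse_grid : Int × Int × Int × List (List String) × Int × Int :=
  (2, 2, 0, [["a", "-"], ["-", "b"]], 0, 0)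

def Spec_collapse_grid (x : Int) (y : Int) (z : Int) (grid : List (List String)) (p1 : Int) (p3 : Int) (out : List (List String)) : Prop := out = collapse_grid_alt x y z grid p1 p3
instance (x : Int) (y : Int) (z : Int) (grid : List (List String)) (p1 : Int) (p3 : Int) (out : List (List String)) : Decidable (Spec_collapse_grid x y z grid p1 p3 out) := by unfold Spec_collapse_grid; infer_instance

-- ===== CLAIM (what is proved, stated in full; the proofs are below) =====
def Claim_equal_collapse_grid : Prop := ∀ (x : Int) (y : Int) (z : Int) (grid : List (List String)) (p1 : Int) (p3 : Int), Dom_collapse_grid x y z grid p1 p3 → Pre_collapse_grid x y z grid p1 p3 → Spec_collapse_grid x y z grid p1 p3 (collapse_grid x y z grid p1 p3)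

-- ===== LEMMAS AND PROOFS =====
-- Both ports are reduced to one pointwise description.  pvCells t is column t's non-dash
-- cells top-to-bottom; pvGrid n m f the n×m grid with entry f r c.  A side: pvInner
-- characterizes A's descending inner loop, pvOuterLoop its outer loop, giving A =
-- pvGrid n m (pvFC …) where pvFC reads the compacted columns pvCols.  B side: pvScanB_char
-- characterizes the cursor scan, pvInnerB the per-row fold over keep.zip ptr (invariant:
-- each cursor's remaining cells pvRem are a take-prefix of its column's cells), pvOuterB
-- the row loop, giving B = the reversed bottom-up rows, which equal the same pvGrid.

def pvRead (grid : List (List String)) (i j : Nat) : String := (grid.getD i []).getD j "-"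
def pvCells (grid : List (List String)) (t u n : Nat) : List String :=
  ((List.range' u (n - u)).map (fun i => pvRead grid i t)).filter (fun v => v ≠ "-")
def pvGrid (n m : Nat) (f : Nat → Nat → String) : List (List String) :=
  (List.range n).map (fun r => (List.range m).map (fun c => f r c))
def pvDesc (u : Nat) : List Int := (List.range u).map (fun k : Nat => (u : Int) - 1 - (k : Int))
def pvStep (grid : List (List String)) (t L : Nat) (s : List (List String) × Int × Int) (i : Int) :
    List (List String) × Int × Int :=
  let v := PySem.List.pyGetD (PySem.List.pyGetD grid i []) (t : Int) "-"
  if v = "-" then s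
  else (PySem.List.pySetD s.1 s.2.1
          (PySem.List.pySetD (PySem.List.pyGetD s.1 s.2.1 []) (L : Int) v),
        s.2.1 - 1, s.2.2 + 1)
def pvState (grid : List (List String)) (n m t L u : Nat) (f : Nat → Nat → String) :
    List (List String) × Int × Int :=
  (pvGrid n m (fun r c =>
      if c = L ∧ n - (pvCells grid t u n).length ≤ r then
        (pvCells grid t u n).getD (r - (n - (pvCells grid t u n).length)) "-"
      else f r c),
   (n : Int) - 1 - ((pvCells grid t u n).length : Int),
   ((pvCells grid t u n).length : Int))
lemma pvDesc_succ (u : Nat) : pvDesc (u + 1) = (u : Int) :: pvDesc u := by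
  unfold pvDesc
  rw [List.range_succ_eq_map, List.map_cons, List.map_map]
  congr 1
  · push_cast; ring
  · apply List.map_congr_left; intro k _; simp only [Function.comp_apply]; push_cast; ring
lemma pvCells_nil (grid : List (List String)) (t n : Nat) : pvCells grid t n n = [] := by
  simp [pvCells]
lemma pvCells_succ (grid : List (List String)) (t u n : Nat) (h : u < n) :
    pvCells grid t u n =
      (if pvRead grid u t = "-" then pvCells grid t (u + 1) n
       else pvRead grid u t :: pvCells grid t (u + 1) n) := by
  have h1 : n - u = (n - (u + 1)) + 1 := by omega
  rw [pvCells, h1, List.range'_succ]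
  by_cases hv : pvRead grid u t = "-" <;> simp [hv, pvCells]
lemma pvCells_len_le (grid : List (List String)) (t u n : Nat) :
    (pvCells grid t u n).length ≤ n - u := by
  calc (pvCells grid t u n).length ≤ _ := List.length_filter_le _ _
  _ = n - u := by simp
lemma pvGrid_congr {n m : Nat} {f g : Nat → Nat → String}
    (h : ∀ r < n, ∀ c < m, f r c = g r c) : pvGrid n m f = pvGrid n m g := by
  unfold pvGrid
  apply List.map_congr_left; intro r hr
  apply List.map_congr_left; intro c hc
  exact h r (List.mem_range.mp hr) c (List.mem_range.mp hc)
lemma pvGrid_getD {n m : Nat} {f : Nat → Nat → String} {r : Nat} (hr : r < n) :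
    (pvGrid n m f).getD r [] = (List.range m).map (fun c => f r c) := by
  unfold pvGrid
  rw [List.getD_eq_getElem?_getD]
  simp [hr]
lemma pvGrid_set {n m : Nat} (f : Nat → Nat → String) {r0 c0 : Nat} (hr : r0 < n) (hc : c0 < m) (v : String) :
    PySem.List.pySetD (pvGrid n m f) (r0 : Int)
      (PySem.List.pySetD (PySem.List.pyGetD (pvGrid n m f) (r0 : Int) []) (c0 : Int) v)
    = pvGrid n m (fun r c => if r = r0 ∧ c = c0 then v else f r c) := by
  have h1 : PySem.List.pyGetD (pvGrid n m f) (r0 : Int) [] = (List.range m).map (fun c => f r0 c) := by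
    rw [PySem.List.pyGetD_natCast, pvGrid_getD hr]
  rw [h1, PySem.List.pySetD_natCast, PySem.List.pySetD_natCast]
  apply List.ext_getElem
  · simp [pvGrid]
  · intro r hra hrb
    simp only [List.length_set, pvGrid, List.length_map, List.length_range] at hra
    simp only [List.getElem_set, pvGrid, List.getElem_map, List.getElem_range]
    by_cases hrr : r = r0
    · subst hrr
      apply List.ext_getElem
      · simp
      · intro c hca hcb
        by_cases hcc : c = c0
        · subst hcc; simp
        · simp [hcc, Ne.symm hcc]
    · simp [Ne.symm hrr, hrr]
lemma pvRange_desc (x : Int) (hx : 0 ≤ x) :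
    PySem.List.pyRange (x - 1) (-1) (-1) = pvDesc x.toNat := by
  rw [PySem.List.pyRange_neg_one]
  unfold pvDesc
  apply List.ext_getElem
  · simp
  · intro k h1 h2; simp; omega
lemma pvRange_asc (y : Int) :
    PySem.List.pyRange 0 y 1 = (List.range y.toNat).map (fun k : Nat => (k : Int)) := by
  rw [PySem.List.pyRange_one]
  apply List.ext_getElem
  · simp
  · intro k h1 h2; simp
lemma pvStep_eq (grid : List (List String)) (n m t L u : Nat) (f : Nat → Nat → String)
    (hu : u < n) (hL : L < m) :
    pvStep grid t L (pvState grid n m t L (u + 1) f) (u : Int) = pvState grid n m t L u f := by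
  have hread : PySem.List.pyGetD (PySem.List.pyGetD grid ((u : Nat) : Int) []) (t : Int) "-"
      = pvRead grid u t := by simp [pvRead]
  have hcs := pvCells_succ grid t u n hu
  have hk1 : (pvCells grid t (u + 1) n).length ≤ n - (u + 1) := pvCells_len_le grid t (u + 1) n
  by_cases hv : pvRead grid u t = "-"
  · have hcells : pvCells grid t u n = pvCells grid t (u + 1) n := by rw [hcs, if_pos hv]
    rw [pvStep, pvState, pvState, hcells]
    simp only [hread, hv, reduceIte]
  · have hcells : pvCells grid t u n = pvRead grid u t :: pvCells grid t (u + 1) n := by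
      rw [hcs, if_neg hv]
    set k1 := (pvCells grid t (u + 1) n).length with hk1def
    rw [pvStep, pvState, pvState, hcells]
    simp only [hread, if_neg hv]
    have hrow : ((n : Int) - 1 - (k1 : Int)) = ((n - 1 - k1 : Nat) : Int) := by
      omega
    rw [hrow, pvGrid_set _ (by omega) hL]
    refine Prod.ext ?_ (Prod.ext ?_ ?_)
    · apply pvGrid_congr
      intro r hr c hc
      simp only [List.length_cons]
      by_cases hcL : c = L
      · subst hcL
        by_cases hr1 : r = n - 1 - k1
        · subst hr1
          rw [if_pos ⟨rfl, rfl⟩, if_pos ⟨rfl, by omega⟩]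
          rw [show (n - 1 - k1) - (n - (k1 + 1)) = 0 from by omega, List.getD_cons_zero]
        · rw [if_neg (fun h => hr1 h.1)]
          by_cases hr2 : n - k1 ≤ r
          · rw [if_pos ⟨rfl, hr2⟩, if_pos ⟨rfl, by omega⟩]
            rw [show r - (n - (k1 + 1)) = (r - (n - k1)) + 1 from by omega, List.getD_cons_succ]
          · rw [if_neg (fun h => hr2 h.2), if_neg (fun h => by omega)]
      · rw [if_neg (fun h => hcL h.2), if_neg (fun h => hcL h.1), if_neg (fun h => hcL h.1)]
    · simp only [List.length_cons]; push_cast; omega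
    · simp only [List.length_cons]; push_cast; omega
lemma pvInner (grid : List (List String)) (n m t L : Nat) (hL : L < m) (f : Nat → Nat → String) :
    ∀ u, u ≤ n →
    (pvDesc u).foldl (pvStep grid t L) (pvState grid n m t L u f)
      = pvState grid n m t L 0 f := by
  intro u
  induction u with
  | zero => intro _; rfl
  | succ u ih =>
    intro hu
    rw [pvDesc_succ, List.foldl_cons, pvStep_eq grid n m t L u f (by omega) hL]
    exact ih (by omega)
def pvCols (grid : List (List String)) (n : Nat) : Nat → List (List String)
  | 0 => []
  | t + 1 => pvCols grid n t ++
      (if pvCells grid t 0 n = [] then []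
       else [List.replicate (n - (pvCells grid t 0 n).length) "-" ++ pvCells grid t 0 n])
def pvFC (grid : List (List String)) (n : Nat) (t : Nat) (r c : Nat) : String :=
  ((pvCols grid n t).getD c []).getD r "-"
lemma pvCols_len_le (grid : List (List String)) (n t : Nat) : (pvCols grid n t).length ≤ t := by
  induction t with
  | zero => simp [pvCols]
  | succ t ih =>
    rw [pvCols]
    by_cases h : pvCells grid t 0 n = [] <;> simp [h] <;> omega

lemma pvOuter_step (grid : List (List String)) (n m t : Nat) (ht : t < m)
    (x : Int) (hx : x = (n : Int)) :
    (fun (st : List (List String) × Int) (j : Int) =>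
      let inner :=
        (PySem.List.pyRange (x - 1) (-1) (-1)).foldl
          (fun (s : List (List String) × Int × Int) i =>
            let v := PySem.List.pyGetD (PySem.List.pyGetD grid i []) j "-"
            if v = "-" then s
            else (PySem.List.pySetD s.1 s.2.1
                    (PySem.List.pySetD (PySem.List.pyGetD s.1 s.2.1 []) st.2 v),
                  s.2.1 - 1, s.2.2 + 1))
          (st.1, (x - 1, 0))
      if inner.2.2 = 0 then (inner.1, st.2) else (inner.1, st.2 + 1))
      (pvGrid n m (pvFC grid n t), ((pvCols grid n t).length : Int)) (t : Int)
    = (pvGrid n m (pvFC grid n (t + 1)), ((pvCols grid n (t + 1)).length : Int)) := by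
  have hxn : x.toNat = n := by omega
  have hL : (pvCols grid n t).length < m := lt_of_le_of_lt (pvCols_len_le grid n t) ht
  set L := (pvCols grid n t).length with hLdef
  have hcnil : pvCells grid t n n = [] := pvCells_nil grid t n
  have hstart : ((pvGrid n m (pvFC grid n t), ((L : Nat) : Int)).1, (x - 1, (0 : Int)))
      = pvState grid n m t L n (pvFC grid n t) := by
    rw [pvState, hcnil]
    simp only [List.length_nil]
    refine Prod.ext ?_ (Prod.ext ?_ ?_)
    · apply pvGrid_congr
      intro r hr c hc
      rw [if_neg (fun h => by omega)]
    · simp; omega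
    · simp
  simp only []
  rw [pvRange_desc x (by omega), hxn, hstart]
  have hfold := pvInner grid n m t L hL (pvFC grid n t) n le_rfl
  have hfun : (fun (s : List (List String) × Int × Int) i =>
      let v := PySem.List.pyGetD (PySem.List.pyGetD grid i []) ((t : Nat) : Int) "-"
      if v = "-" then s
      else (PySem.List.pySetD s.1 s.2.1
              (PySem.List.pySetD (PySem.List.pyGetD s.1 s.2.1 [])
                ((pvGrid n m (pvFC grid n t), ((L : Nat) : Int)) : List (List String) × Int).2 v),
            s.2.1 - 1, s.2.2 + 1)) = pvStep grid t L := by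
    rfl
  rw [hfun, hfold]
  by_cases hk : pvCells grid t 0 n = []
  · have hk0 : (pvCells grid t 0 n).length = 0 := by rw [hk]; rfl
    have hcols : pvCols grid n (t + 1) = pvCols grid n t := by
      rw [pvCols, if_pos hk, List.append_nil]
    rw [pvState, hk0]
    simp only [Nat.cast_zero, reduceIte]
    refine Prod.ext ?_ ?_
    · apply pvGrid_congr
      intro r hr c hc
      rw [if_neg (fun h => by omega), pvFC, pvFC, hcols]
    · rw [hcols]
  · have hkpos : 0 < (pvCells grid t 0 n).length := List.length_pos_of_ne_nil hk
    have hcols : pvCols grid n (t + 1)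
        = pvCols grid n t ++ [List.replicate (n - (pvCells grid t 0 n).length) "-" ++ pvCells grid t 0 n] := by
      rw [pvCols, if_neg hk]
    have hklen : (pvCells grid t 0 n).length ≤ n := by
      have := pvCells_len_le grid t 0 n; omega
    rw [pvState]
    have hne : ¬(((pvCells grid t 0 n).length : Int) = 0) := by
      simp; omega
    rw [if_neg hne]
    refine Prod.ext ?_ ?_
    · apply pvGrid_congr
      intro r hr c hc
      simp only [pvFC]
      rw [hcols]
      by_cases hcL : c = L
      · subst hcL
        rw [List.getD_append_right _ _ _ _ (le_of_eq hLdef.symm)]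
        rw [show L - (pvCols grid n t).length = 0 from by rw [hLdef, Nat.sub_self]]
        simp only [List.getD_cons_zero]
        by_cases hrk : n - (pvCells grid t 0 n).length ≤ r
        · rw [if_pos ⟨by trivial, hrk⟩]
          rw [List.getD_append_right _ _ _ _ (by simp; omega)]
          simp only [List.length_replicate]
        · rw [if_neg (fun h => hrk h.2)]
          rw [List.getD_append _ _ _ _ (by simp; omega)]
          rw [List.getD_replicate _ (by omega)]
          rw [List.getD_eq_default _ _ (le_of_eq hLdef.symm)]
          simp
      · rw [if_neg (fun h => hcL h.1)]
        by_cases hcl : c < L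
        · rw [List.getD_append _ _ _ _ (by omega)]
        · have e1 : (pvCols grid n t).getD c [] = [] :=
            List.getD_eq_default _ _ (by omega)
          have e2 : (pvCols grid n t ++
              [List.replicate (n - (pvCells grid t 0 n).length) "-" ++ pvCells grid t 0 n]).getD c [] = [] :=
            List.getD_eq_default _ _ (by simp; omega)
          rw [e1, e2]
    · rw [hcols]; simp; exact hLdef

lemma pvOuterLoop (grid : List (List String)) (n m : Nat) (x : Int) (hx : x = (n : Int)) :
    ∀ T, T ≤ m →
    (List.range T).foldl
      (fun (st : List (List String) × Int) (k : Nat) =>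
        (fun (st' : List (List String) × Int) (j : Int) =>
          let inner :=
            (PySem.List.pyRange (x - 1) (-1) (-1)).foldl
              (fun (s : List (List String) × Int × Int) i =>
                let v := PySem.List.pyGetD (PySem.List.pyGetD grid i []) j "-"
                if v = "-" then s
                else (PySem.List.pySetD s.1 s.2.1
                        (PySem.List.pySetD (PySem.List.pyGetD s.1 s.2.1 []) st'.2 v),
                      s.2.1 - 1, s.2.2 + 1))
              (st'.1, (x - 1, 0))
          if inner.2.2 = 0 then (inner.1, st'.2) else (inner.1, st'.2 + 1)) st (k : Int))
      (pvGrid n m (fun _ _ => "-"), (0 : Int))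
    = (pvGrid n m (pvFC grid n T), ((pvCols grid n T).length : Int)) := by
  intro T
  induction T with
  | zero =>
    intro _
    rw [List.range_zero, List.foldl_nil]
    refine Prod.ext ?_ ?_
    · apply pvGrid_congr
      intro r hr c hc
      simp [pvFC, pvCols]
    · simp [pvCols]
  | succ T ih =>
    intro hT
    rw [List.range_succ, List.foldl_append, List.foldl_cons, List.foldl_nil, ih (by omega)]
    exact pvOuter_step grid n m T (by omega) x hx

lemma pvFoldl_id {α β : Type} (l : List α) (s : β) (f : β → α → β) (h : ∀ s a, f s a = s) :
    l.foldl f s = s := by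
  induction l generalizing s with
  | nil => rfl
  | cons a l ih => rw [List.foldl_cons, h]; exact ih s

-- ---------- B side ----------
def pvRem (grid : List (List String)) (p : Int) (j : Nat) : List String :=
  if p < 0 then [] else pvCells grid j 0 (p.toNat + 1)
def pvKeep (grid : List (List String)) (n m : Nat) : List Nat :=
  (List.range m).filter (fun j => !(pvCells grid j 0 n).isEmpty)
def pvInvB (grid : List (List String)) (n t : Nat) (j : Nat) (p : Int) : Prop :=
  pvRem grid p j = (pvCells grid j 0 n).take ((pvCells grid j 0 n).length - t)
def pvRowB (grid : List (List String)) (n pad : Nat) (ks : List Nat) (s : Nat) : List String :=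
  ks.map (fun j => ((pvCells grid j 0 n).take ((pvCells grid j 0 n).length - s)).getLastD "-")
    ++ List.replicate pad "-"
def pvStepInner (grid : List (List String)) (rp : List String × List Int) (jp : Int × Int) :
    List String × List Int :=
  let i := pvScanB grid jp.1 jp.2
  (rp.1 ++ [if 0 ≤ i then PySem.List.pyGetD (PySem.List.pyGetD grid i []) jp.1 "-" else "-"],
   rp.2 ++ [i - 1])
def pvStepOuter (grid : List (List String)) (keep : List Int) (pad : Nat)
    (st : List (List String) × List Int) : List (List String) × List Int :=
  let rp := (keep.zip st.2).foldl (pvStepInner grid) ([], [])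
  (st.1 ++ [rp.1 ++ List.replicate pad "-"], rp.2)

lemma pvCells_zero (grid : List (List String)) (j : Nat) : pvCells grid j 0 0 = [] := by
  simp [pvCells]
lemma pvCells_snoc (grid : List (List String)) (j q : Nat) :
    pvCells grid j 0 (q + 1)
      = pvCells grid j 0 q ++ (if pvRead grid q j = "-" then [] else [pvRead grid q j]) := by
  unfold pvCells
  rw [Nat.sub_zero, Nat.sub_zero, show List.range' 0 (q+1) = List.range' 0 q ++ [0+1*q] from List.range'_concat,
    List.map_append, List.filter_append]
  by_cases hv : pvRead grid q j = "-" <;> simp [hv]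
lemma pvRead_cast (grid : List (List String)) (q j : Nat) :
    PySem.List.pyGetD (PySem.List.pyGetD grid ((q : Nat) : Int) []) ((j : Nat) : Int) "-"
      = pvRead grid q j := by
  simp [pvRead]
lemma pvScanB_neg (grid : List (List String)) (j : Int) {i : Int} (h : i < 0) :
    pvScanB grid j i = i := by
  rw [pvScanB, dif_neg (fun hc => absurd hc.1 (by omega))]
lemma pvScanB_char (grid : List (List String)) (j : Nat) : ∀ q : Nat,
    (pvCells grid j 0 (q + 1) = [] ∧ pvScanB grid (j : Int) (q : Int) = -1) ∨
    (∃ r : Nat, r ≤ q ∧ pvScanB grid (j : Int) (q : Int) = (r : Int) ∧ pvRead grid r j ≠ "-" ∧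
       pvCells grid j 0 (q + 1) = pvCells grid j 0 r ++ [pvRead grid r j]) := by
  intro q
  induction q with
  | zero =>
    rw [pvScanB]
    by_cases hv : pvRead grid 0 j = "-"
    · rw [dif_pos ⟨by omega, by rw [pvRead_cast grid 0 j]; exact hv⟩]
      left
      refine ⟨?_, pvScanB_neg grid j (by omega)⟩
      rw [pvCells_snoc, pvCells_zero, if_pos hv]
      rfl
    · rw [dif_neg (fun hc => hv ((pvRead_cast grid 0 j) ▸ hc.2))]
      right
      exact ⟨0, le_rfl, rfl, hv, by rw [pvCells_snoc, pvCells_zero, if_neg hv]⟩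
  | succ q ih =>
    rw [pvScanB]
    by_cases hv : pvRead grid (q + 1) j = "-"
    · rw [dif_pos ⟨by omega, by rw [pvRead_cast grid (q + 1) j]; exact hv⟩,
        show ((q + 1 : Nat) : Int) - 1 = (q : Int) from by push_cast; ring]
      have hsn : pvCells grid j 0 (q + 1 + 1) = pvCells grid j 0 (q + 1) := by
        rw [pvCells_snoc, if_pos hv, List.append_nil]
      rcases ih with ⟨hc, hs⟩ | ⟨r, hr, hs, hrv, hcell⟩
      · exact Or.inl ⟨by rw [hsn, hc], hs⟩
      · exact Or.inr ⟨r, by omega, hs, hrv, by rw [hsn, hcell]⟩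
    · rw [dif_neg (fun hc => hv ((pvRead_cast grid (q + 1) j) ▸ hc.2))]
      right
      exact ⟨q + 1, le_rfl, rfl, hv, by rw [pvCells_snoc, if_neg hv]⟩
lemma pvStepB (grid : List (List String)) (j : Nat) (p : Int) :
    ((if 0 ≤ pvScanB grid (j : Int) p then
        PySem.List.pyGetD (PySem.List.pyGetD grid (pvScanB grid (j : Int) p) []) (j : Int) "-"
      else "-") = (pvRem grid p j).getLastD "-")
    ∧ pvRem grid (pvScanB grid (j : Int) p - 1) j = (pvRem grid p j).dropLast := by
  by_cases hp : p < 0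
  · rw [pvScanB_neg grid _ hp, if_neg (by omega), pvRem, if_pos hp, pvRem, if_pos (by omega)]
    exact ⟨rfl, rfl⟩
  · have hq : p = ((p.toNat : Nat) : Int) := by omega
    have hrem : pvRem grid p j = pvCells grid j 0 (p.toNat + 1) := by
      rw [pvRem, if_neg hp]
    rcases pvScanB_char grid j p.toNat with ⟨hc, hs⟩ | ⟨r, hr, hs, hrv, hcell⟩
    · have hs' : pvScanB grid (j : Int) p = -1 := by rw [hq]; exact hs
      rw [hs', if_neg (by omega), hrem, hc]
      refine ⟨rfl, ?_⟩
      rw [pvRem, if_pos (by omega)]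
      rfl
    · have hs' : pvScanB grid (j : Int) p = (r : Int) := by rw [hq]; exact hs
      rw [hs', if_pos (by omega), hrem, hcell]
      constructor
      · rw [List.getLastD_concat]
        exact pvRead_cast grid r j
      · rw [List.dropLast_concat, pvRem]
        by_cases hr0 : r = 0
        · subst hr0
          rw [if_pos (by omega), pvCells_zero]
        · rw [if_neg (by omega), show (((r : Nat) : Int) - 1).toNat + 1 = r from by omega]
lemma pvDropLast_take {α : Type} (l : List α) (m : Nat) (hm : m ≤ l.length) :
    (l.take m).dropLast = l.take (m - 1) := by
  cases m with
  | zero => simp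
  | succ m' =>
    rw [List.take_add_one, List.getElem?_eq_getElem (by omega), Option.toList_some,
      List.dropLast_concat]
    simp
lemma pvInnerB (grid : List (List String)) (n t : Nat) :
    ∀ (ks : List Nat) (ps : List Int), List.Forall₂ (pvInvB grid n t) ks ps →
    ∀ (acc1 : List String) (acc2 : List Int),
    ∃ qs : List Int,
      ((ks.map (fun j : Nat => (j : Int))).zip ps).foldl (pvStepInner grid) (acc1, acc2)
        = (acc1 ++ ks.map (fun j =>
              ((pvCells grid j 0 n).take ((pvCells grid j 0 n).length - t)).getLastD "-"),
           acc2 ++ qs)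
      ∧ List.Forall₂ (pvInvB grid n (t + 1)) ks qs := by
  intro ks ps h
  induction h with
  | nil => intro acc1 acc2; exact ⟨[], by simp, List.Forall₂.nil⟩
  | @cons j p ks' ps' hjp htail ih =>
    intro acc1 acc2
    have hstep := pvStepB grid j p
    have hlen : (pvCells grid j 0 n).length - t ≤ (pvCells grid j 0 n).length := by omega
    have hval : (if 0 ≤ pvScanB grid (j : Int) p then
        PySem.List.pyGetD (PySem.List.pyGetD grid (pvScanB grid (j : Int) p) []) (j : Int) "-"
      else "-") = ((pvCells grid j 0 n).take ((pvCells grid j 0 n).length - t)).getLastD "-" := by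
      rw [hstep.1, hjp]
    have hinv : pvInvB grid n (t + 1) j (pvScanB grid (j : Int) p - 1) := by
      unfold pvInvB
      rw [hstep.2, hjp, pvDropLast_take _ _ (by omega)]
      congr 1
    obtain ⟨qs, hfold, hf⟩ := ih (acc1 ++ [((pvCells grid j 0 n).take
        ((pvCells grid j 0 n).length - t)).getLastD "-"]) (acc2 ++ [pvScanB grid (j : Int) p - 1])
    refine ⟨(pvScanB grid (j : Int) p - 1) :: qs, ?_, List.Forall₂.cons hinv hf⟩
    rw [List.map_cons, List.zip_cons_cons, List.foldl_cons]
    have hstep1 : pvStepInner grid (acc1, acc2) ((j : Int), p)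
        = (acc1 ++ [((pvCells grid j 0 n).take ((pvCells grid j 0 n).length - t)).getLastD "-"],
           acc2 ++ [pvScanB grid (j : Int) p - 1]) := by
      simp only [pvStepInner]
      rw [hval]
    rw [hstep1, hfold]
    simp
lemma pvForall₂_replicate {P : Nat → Int → Prop} (a : Int) :
    ∀ ks : List Nat, (∀ j ∈ ks, P j a) → List.Forall₂ P ks (List.replicate ks.length a) := by
  intro ks
  induction ks with
  | nil => intro _; exact List.Forall₂.nil
  | cons j ks ih =>
    intro h
    exact List.Forall₂.cons (h j (by simp)) (ih (fun j' hj' => h j' (by simp [hj'])))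
lemma pvOuterB (grid : List (List String)) (n pad : Nat) (ks : List Nat) (x : Int)
    (hx : x = (n : Int)) :
    ∀ t : Nat, ∃ ps,
      (List.range t).foldl (fun st (_ : Nat) => pvStepOuter grid (ks.map (fun j : Nat => (j : Int))) pad st)
          ([], List.replicate (ks.map (fun j : Nat => (j : Int))).length (x - 1))
        = ((List.range t).map (pvRowB grid n pad ks), ps)
      ∧ List.Forall₂ (pvInvB grid n t) ks ps := by
  intro t
  induction t with
  | zero =>
    refine ⟨List.replicate ks.length (x - 1), by simp, ?_⟩
    apply pvForall₂_replicate
    intro j _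
    unfold pvInvB pvRem
    by_cases hn : n = 0
    · rw [if_pos (by omega), hn, pvCells_zero]; simp
    · rw [if_neg (by omega), show (x - 1).toNat + 1 = n from by omega, Nat.sub_zero,
        List.take_length]
  | succ t ih =>
    obtain ⟨ps, hfold, hf⟩ := ih
    obtain ⟨qs, hin, hfq⟩ := pvInnerB grid n t ks ps hf [] []
    refine ⟨qs, ?_, hfq⟩
    rw [List.range_succ, List.foldl_append, List.foldl_cons, List.foldl_nil, hfold]
    unfold pvStepOuter
    rw [hin]
    simp only [List.nil_append]
    rw [List.map_append]
    rfl
lemma pvTake_getLastD (l : List String) (m : Nat) (hm : m < l.length) :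
    (l.take (m + 1)).getLastD "-" = l.getD m "-" := by
  rw [List.take_add_one, List.getElem?_eq_getElem hm, Option.toList_some, List.getLastD_concat,
    List.getD_eq_getElem?_getD, List.getElem?_eq_getElem hm, Option.getD_some]
lemma pvCell_point (cl : List String) (n r : Nat) (hk : cl.length ≤ n) (hr : r < n) :
    (cl.take (cl.length - (n - 1 - r))).getLastD "-"
      = (List.replicate (n - cl.length) "-" ++ cl).getD r "-" := by
  by_cases hcase : r < n - cl.length
  · rw [List.getD_append _ _ _ _ (by simp; omega), List.getD_replicate _ (by omega)]
    rw [show cl.length - (n - 1 - r) = 0 from by omega]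
    simp
  · rw [List.getD_append_right _ _ _ _ (by simp; omega)]
    simp only [List.length_replicate]
    rw [show cl.length - (n - 1 - r) = (r - (n - cl.length)) + 1 from by omega]
    exact pvTake_getLastD cl _ (by omega)
lemma pvCols_eq (grid : List (List String)) (n : Nat) : ∀ T,
    pvCols grid n T = (pvKeep grid n T).map
      (fun j => List.replicate (n - (pvCells grid j 0 n).length) "-" ++ pvCells grid j 0 n) := by
  intro T
  induction T with
  | zero => simp [pvCols, pvKeep]
  | succ T ih =>
    rw [pvCols, ih]
    unfold pvKeep
    rw [List.range_succ, List.filter_append, List.map_append]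
    congr 1
    by_cases h : pvCells grid T 0 n = [] <;> simp [h]
lemma pvKeep_pred (grid : List (List String)) (n : Nat) (x : Int) (hx : x = (n : Int)) (j : Nat) :
    ((PySem.List.pyRange 0 x 1).any (fun i =>
        !(PySem.List.pyGetD (PySem.List.pyGetD grid i []) (j : Int) "-" == "-")))
      = !(pvCells grid j 0 n).isEmpty := by
  have hiff : (∃ i, i < n ∧ ¬ pvRead grid i j = "-") ↔ ¬ pvCells grid j 0 n = [] := by
    unfold pvCells
    rw [Nat.sub_zero, ← List.range_eq_range']
    constructor
    · rintro ⟨i, hi, hv⟩ hnil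
      have hmem : pvRead grid i j ∈
          (((List.range n).map (fun i => pvRead grid i j)).filter (fun v => v ≠ "-")) := by
        rw [List.mem_filter]
        exact ⟨List.mem_map_of_mem (List.mem_range.mpr hi), by simpa using hv⟩
      rw [hnil] at hmem
      exact absurd hmem List.not_mem_nil
    · intro h
      by_contra hc
      push_neg at hc
      apply h
      rw [List.filter_eq_nil_iff]
      intro v hv
      rw [List.mem_map] at hv
      obtain ⟨i, hi, rfl⟩ := hv
      simpa using hc i (List.mem_range.mp hi)
  rw [pvRange_asc x, List.any_map, show x.toNat = n from by omega, Bool.eq_iff_iff]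
  simp only [List.any_eq_true, Function.comp_apply, List.mem_range, Bool.not_eq_true',
    beq_eq_false_iff_ne, ne_eq, List.isEmpty_eq_false_iff, pvRead_cast]
  exact hiff
lemma pvKeep_len_le (grid : List (List String)) (n m : Nat) : (pvKeep grid n m).length ≤ m := by
  calc (pvKeep grid n m).length ≤ (List.range m).length := List.length_filter_le _ _
  _ = m := by simp

theorem pvMain (x y z : Int) (grid : List (List String)) (p1 p3 : Int) :
    collapse_grid x y z grid p1 p3 = collapse_grid_alt x y z grid p1 p3 := by
  by_cases hx : 0 ≤ x
  · have hxn : x = (x.toNat : Int) := by omega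
    set n := x.toNat with hn
    set m := y.toNat with hm
    have hA : collapse_grid x y z grid p1 p3 = pvGrid n m (pvFC grid n m) := by
      simp only [collapse_grid]
      have hinit : ((PySem.List.pyRange 0 x 1).map
          (fun _ => (PySem.List.pyRange 0 y 1).map (fun _ => ("-" : String))))
          = pvGrid n m (fun _ _ => "-") := by
        rw [pvRange_asc x, pvRange_asc y, pvGrid, List.map_map]
        apply List.map_congr_left; intro _ _
        rw [List.map_map]
        apply List.map_congr_left; intro _ _
        rfl
      rw [hinit, pvRange_asc y, List.foldl_map]
      exact congrArg Prod.fst (pvOuterLoop grid n m x hxn m le_rfl)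
    -- B side
    set K := (pvKeep grid n m).length with hK
    have hKm : K ≤ m := pvKeep_len_le grid n m
    have hB : collapse_grid_alt x y z grid p1 p3
        = ((List.range n).map (pvRowB grid n
            ((y - (((pvKeep grid n m).map (fun j : Nat => (j : Int))).length : Int)).toNat)
            (pvKeep grid n m))).reverse := by
      simp only [collapse_grid_alt]
      have hkeep : (PySem.List.pyRange 0 y 1).filter (fun j =>
          (PySem.List.pyRange 0 x 1).any (fun i =>
            !(PySem.List.pyGetD (PySem.List.pyGetD grid i []) j "-" == "-")))
          = (pvKeep grid n m).map (fun j : Nat => (j : Int)) := by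
        rw [pvRange_asc y, List.filter_map]
        unfold pvKeep
        congr 1
        apply List.filter_congr
        intro j _
        exact pvKeep_pred grid n x hxn j
      rw [hkeep]
      rw [pvRange_asc x, List.foldl_map]
      obtain ⟨ps, hfold, _⟩ := pvOuterB grid n
        ((y - (((pvKeep grid n m).map (fun j : Nat => (j : Int))).length : Int)).toNat)
        (pvKeep grid n m) x hxn n
      rw [show (fun (st : List (List String) × List Int) (_ : Nat) =>
          let rp := (((pvKeep grid n m).map (fun j : Nat => (j : Int))).zip st.2).foldl
            (fun (rp : List String × List Int) (jp : Int × Int) =>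
              let i := pvScanB grid jp.1 jp.2
              (rp.1 ++ [if 0 ≤ i then PySem.List.pyGetD (PySem.List.pyGetD grid i []) jp.1 "-" else "-"],
               rp.2 ++ [i - 1])) ([], [])
          (st.1 ++ [rp.1 ++ List.replicate
              (y - ((((pvKeep grid n m).map (fun j : Nat => (j : Int))).length : Nat) : Int)).toNat "-"],
           rp.2))
        = (fun st (_ : Nat) => pvStepOuter grid ((pvKeep grid n m).map (fun j : Nat => (j : Int)))
            ((y - (((pvKeep grid n m).map (fun j : Nat => (j : Int))).length : Int)).toNat) st) from rfl]
      rw [hfold]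
    have hpad : ((y - (((pvKeep grid n m).map (fun j : Nat => (j : Int))).length : Int)).toNat) = m - K := by
      rw [List.length_map]
      rcases le_or_gt 0 y with hy | hy
      · have : y = (m : Int) := by omega
        omega
      · have hm0 : m = 0 := by omega
        have : K = 0 := by omega
        omega
    rw [hpad] at hB
    have hfin : ((List.range n).map (pvRowB grid n (m - K) (pvKeep grid n m))).reverse
        = pvGrid n m (pvFC grid n m) := by
      apply List.ext_getElem
      · simp [pvGrid]
      · intro r h1 h2
        have hrn : r < n := by simpa [pvGrid] using h2
        rw [List.getElem_reverse]
        simp only [List.length_map, List.length_range]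
        rw [List.getElem_map, List.getElem_range]
        simp only [pvGrid, List.getElem_map, List.getElem_range]
        apply List.ext_getElem
        · simp [pvRowB]; omega
        · intro c hc1 hc2
          have hcm : c < m := by simpa using hc2
          simp only [List.getElem_map, List.getElem_range]
          unfold pvRowB pvFC
          rw [pvCols_eq grid n m]
          by_cases hcK : c < K
          · have hcK' : c < (pvKeep grid n m).length := by simpa using hcK
            rw [List.getElem_append_left (by simpa using hcK), List.getElem_map]
            have hgd : (List.map (fun j => List.replicate (n - (pvCells grid j 0 n).length) "-"
                  ++ pvCells grid j 0 n) (pvKeep grid n m)).getD c []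
                = List.replicate (n - (pvCells grid ((pvKeep grid n m)[c]'hcK') 0 n).length) "-"
                  ++ pvCells grid ((pvKeep grid n m)[c]'hcK') 0 n := by
              rw [List.getD_eq_getElem?_getD, List.getElem?_map, List.getElem?_eq_getElem hcK']
              rfl
            rw [hgd]
            exact pvCell_point _ n r (by
              have := pvCells_len_le grid ((pvKeep grid n m)[c]'hcK') 0 n; omega) hrn
          · rw [List.getElem_append_right (by simpa using not_lt.mp (by omega))]
            rw [List.getElem_replicate]
            have hgd : (List.map (fun j => List.replicate (n - (pvCells grid j 0 n).length) "-"
                  ++ pvCells grid j 0 n) (pvKeep grid n m)).getD c [] = ([] : List String) :=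
              List.getD_eq_default _ _ (by simpa using not_lt.mp (by omega))
            rw [hgd]
            rfl
    rw [hA, hB, hfin]
  · have hA : collapse_grid x y z grid p1 p3 = [] := by
      simp only [collapse_grid]
      rw [PySem.List.pyRange_one_eq_nil (show x ≤ 0 by omega), List.map_nil]
      rw [PySem.List.pyRange_neg_one_eq_nil (by omega)]
      rw [pvFoldl_id _ _ _ (fun s a => by simp)]
    have hB : collapse_grid_alt x y z grid p1 p3 = [] := by
      simp only [collapse_grid_alt]
      rw [PySem.List.pyRange_one_eq_nil (show x ≤ 0 by omega), List.foldl_nil]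
      rfl
    rw [hA, hB]

-- ===== VERDICT (by name: the statement is the Claim_ definition above) =====
theorem collapse_grid_spec : Claim_equal_collapse_grid := by
  intro x y z grid p1 p3 _ _
  exact pvMain x y z grid p1 p3
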